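-- pv_equiv track=rewrite | github.com/tabbymargot/launch_school_modules | py_110/lesson_1/adjacent_consonants.py | sort_by_consonant_count
-- ===== SOURCE A (Python) =====
-- CONSONANTS = "bcdfghjklmnpqrstvwxyz"
--
-- def sort_by_consonant_count(lst):
--
--     words_and_scores = []
--     sorted_words = []
--
--     for word in lst:
--         points_running_total = 0
--         word_no_space = word.replace(" ", "")
--
--         for idx, current_letter in enumerate(word_no_space):
--
--             if idx != len(word_no_space) - 1:
--                 next_letter = word_no_space[idx + 1]
--             if idx != 0:
--                 previous_letter = word_no_space[idx - 1]
--
--             if current_letter in CONSONANTS: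
--                 # If it's the first letter in the string and the next letter is a consonant
--                 if idx == 0:
--                     if next_letter in CONSONANTS:
--                         points_running_total += 1
--                 # If it's the last letter in the string and the previous letter is a consonant
--                 elif idx == len(word_no_space) - 1:
--                     if previous_letter in CONSONANTS:
--                         points_running_total += 1
--                 # If it's any other letter in the string and the previous and / or next letter is a consonant
--                 else:
--                     if (previous_letter in CONSONANTS) or (next_letter in CONSONANTS):
--                         points_running_total += 1
--
--         word_and_score = [word, points_running_total]
--         words_and_scores.append(word_and_score)
--
--     list_of_sorted_words = sort_the_words(words_and_scores)
--     return list_of_sorted_words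
--
-- def sort_the_words(the_words_and_scores):
--     scores = []
--     sorted_words = []
--
--     for nested_list in the_words_and_scores:
--         scores.append(nested_list[1])
--
--     score_being_checked = max(scores)
--
--     while score_being_checked >= 0:
--         for the_nested_list in the_words_and_scores:
--             if the_nested_list[1] == score_being_checked:
--                 sorted_words.append(the_nested_list[0])
--
--         score_being_checked -= 1
--
--     return sorted_words
-- ===== SOURCE B (Python) =====
-- CONSONANTS = "bcdfghjklmnpqrstvwxyz"
--
--
-- def sort_by_consonant_count(lst):
--     # Score each word in one uniform neighbour-test pass and drop it into a
--     # bucket keyed by score, then emit the buckets from the top score down.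
--     cons = frozenset(CONSONANTS)
--     buckets = {}
--     top = 0
--     for word in lst:
--         w = word.replace(" ", "")
--         score = 0
--         for i, c in enumerate(w):
--             if c in cons and ((i > 0 and w[i - 1] in cons)
--                               or (i + 1 < len(w) and w[i + 1] in cons)):
--                 score += 1
--         buckets.setdefault(score, []).append(word)
--         top = max(top, score)
--     out = []
--     for s in range(top, -1, -1):
--         out.extend(buckets.get(s, []))
--     return out
-- ===== Notes on version B (the rewrite author's own statement) =====
-- stated objective: alternative
-- what changed: B scores each word in one uniform neighbour-test pass and drops it into a dict bucket keyed by score while tracking the running maximum, then emits the buckets from the top score down, instead of A's three-branch stateful letter loop followed by a full rescan of the word/score pair list at every score level from the maximum down to 0.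
-- intended difference: On lists containing a word that strips to a single consonant and is preceded by a multi-letter word ending in a consonant, A scores that word 1 because it reads the stale next_letter left over from the previous word's loop and so may move it ahead in the output, while B scores an isolated letter 0 since it has no adjacent letters, which is the intended adjacent-consonant rule. — e.g. on sort_by_consonant_count(["ab", "c"]): A returns ["c", "ab"], B returns ["ab", "c"]
-- outside the precondition, e.g. on sort_by_consonant_count([]): A raises ValueError, B returns []; on sort_by_consonant_count(['c']): A raises UnboundLocalError, B returns ['c']
import Mathlib
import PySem

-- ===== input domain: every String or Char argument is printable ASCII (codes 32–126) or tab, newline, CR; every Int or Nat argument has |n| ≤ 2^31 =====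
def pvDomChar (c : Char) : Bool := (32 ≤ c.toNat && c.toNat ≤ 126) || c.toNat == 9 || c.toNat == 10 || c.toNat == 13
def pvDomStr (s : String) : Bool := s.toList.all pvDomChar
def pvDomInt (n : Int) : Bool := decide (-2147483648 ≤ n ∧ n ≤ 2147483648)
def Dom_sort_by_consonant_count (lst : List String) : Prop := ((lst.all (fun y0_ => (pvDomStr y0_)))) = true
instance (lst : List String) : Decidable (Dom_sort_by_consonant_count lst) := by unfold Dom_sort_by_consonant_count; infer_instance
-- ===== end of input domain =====

-- B buckets the words by score in one uniform neighbour-test pass and emits the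
-- buckets from the top score down (alternative algorithm; agreement claimed
-- outside D_, where A reads a stale next_letter for single-consonant words).

-- shared module constant CONSONANTS
def pvCONS : List Char := "bcdfghjklmnpqrstvwxyz".toList

-- Python's `c in CONSONANTS` on a single character is exactly membership
def pvIsCons (c : Char) : Bool := pvCONS.contains c

-- membership test on a possibly-unassigned variable; `none` is where Python
-- raises UnboundLocalError (excluded by Pre_), `false` is the harmless default
def pvOptCons : Option Char → Bool
  | some c => pvIsCons c
  | none => false

-- word.replace(" ", ""), kept as a list of characters
def pvStrip (w : String) : List Char := PySem.Chars.replace w.toList [' '] []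

-- ===== PORT A =====
-- one iteration of A's inner `for idx, current_letter in enumerate(word_no_space)`
-- state: (points_running_total, previous_letter, next_letter)
def pvAStep (cs : List Char) (st : Int × Option Char × Option Char) (pc : Int × Char) :
    Int × Option Char × Option Char :=
  let n : Int := cs.length
  let nx := if pc.1 ≠ n - 1 then PySem.List.pyGet? cs (pc.1 + 1) else st.2.2
  let pr := if pc.1 ≠ 0 then PySem.List.pyGet? cs (pc.1 - 1) else st.2.1
  let pts :=
    if pvIsCons pc.2 then
      if pc.1 = 0 then (if pvOptCons nx then st.1 + 1 else st.1)
      else if pc.1 = n - 1 then (if pvOptCons pr then st.1 + 1 else st.1)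
      else (if pvOptCons pr || pvOptCons nx then st.1 + 1 else st.1)
    else st.1
  (pts, pr, nx)

-- one iteration of A's outer loop; previous_letter / next_letter persist across words
def pvAWord (st : List (String × Int) × Option Char × Option Char) (word : String) :
    List (String × Int) × Option Char × Option Char :=
  let cs := pvStrip word
  let r := (PySem.List.enumerate cs).foldl (pvAStep cs) (0, st.2.1, st.2.2)
  (st.1 ++ [(word, r.1)], r.2.1, r.2.2)

-- A's `while score_being_checked >= 0` loop (fuel = number of remaining scores)
def pvSortWhile (pairs : List (String × Int)) : Int → Nat → List String → List String
  | _, 0, acc => acc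
  | s, fuel + 1, acc =>
      pvSortWhile pairs (s - 1) fuel
        (pairs.foldl (fun a p => if p.2 == s then a ++ [p.1] else a) acc)

-- sort_the_words
def pvSortTheWords (pairs : List (String × Int)) : List String :=
  let scores := pairs.foldl (fun acc p => acc ++ [p.2]) ([] : List Int)
  match PySem.List.max? scores (fun x => x) with
  | none => []   -- Python: max([]) raises ValueError; excluded by Pre_
  | some m => pvSortWhile pairs m (m + 1).toNat []

def sort_by_consonant_count (lst : List String) : List String :=
  pvSortTheWords (lst.foldl pvAWord ([], none, none)).1

-- ===== PORT B =====
-- one term of B's score loop over enumerate(w)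
def pvBScoreStep (cs : List Char) (s : Int) (pc : Int × Char) : Int :=
  if pvIsCons pc.2 &&
      ((decide (0 < pc.1) && pvOptCons (PySem.List.pyGet? cs (pc.1 - 1))) ||
       (decide (pc.1 + 1 < (cs.length : Int)) && pvOptCons (PySem.List.pyGet? cs (pc.1 + 1)))) then
    s + 1
  else s

-- B's score of one word
def pvWScoreB (cs : List Char) : Int :=
  (PySem.List.enumerate cs).foldl (pvBScoreStep cs) 0

-- one iteration of B's loop; state: (buckets, top)
def pvBWord (st : PySem.Dict Int (List String) × Int) (word : String) :
    PySem.Dict Int (List String) × Int :=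
  let s := pvWScoreB (pvStrip word)
  (st.1.modify s [] (· ++ [word]), max st.2 s)

def sort_by_consonant_count_alt (lst : List String) : List String :=
  let st := lst.foldl pvBWord (PySem.Dict.empty, 0)
  (PySem.List.pyRange st.2 (-1) (-1)).foldl (fun acc s => acc ++ st.1.getD s []) []

-- ===== PRECONDITION & SPEC =====
-- a word that strips to a single consonant (A then reads the carried next_letter)
def pvBad (w : String) : Bool :=
  match pvStrip w with
  | [c] => pvIsCons c
  | _ => false

-- a word whose stripped form has ≥ 2 letters (A's loop then assigns next_letter)
def pvLong (w : String) : Bool := decide (2 ≤ (pvStrip w).length)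

-- Pre_ excludes exactly the inputs on which Python A raises: the empty list
-- (max([]) is ValueError) and lists whose first single-consonant word has no
-- earlier multi-letter word (next_letter unassigned: UnboundLocalError).
def Pre_sort_by_consonant_count (lst : List String) : Prop :=
  lst ≠ [] ∧ ∀ i : Fin lst.length, pvBad lst[i] = true →
    ∃ j : Fin lst.length, (j : Nat) < (i : Nat) ∧ pvLong lst[j] = true
instance (lst : List String) : Decidable (Pre_sort_by_consonant_count lst) := by
  unfold Pre_sort_by_consonant_count; infer_instance

def pvWitness_sort_by_consonant_count : List String := ["ab", "c"]

-- the trailing letter of the last multi-letter stripped word so far (A's stale next_letter)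
def pvNewCarry (carry : Option Char) (cs : List Char) : Option Char :=
  if 1 < cs.length then cs[cs.length - 1]? else carry

-- does the list contain a word stripping to a single consonant whose carried
-- stale letter is a consonant?
def pvBadAt : Option Char → List String → Bool
  | _, [] => false
  | c, w :: ws =>
      (match pvStrip w with
       | [d] => pvIsCons d && pvOptCons c
       | _ => false) || pvBadAt (pvNewCarry c (pvStrip w)) ws

-- On lists containing a word that strips to a single consonant preceded by a
-- multi-letter word ending in a consonant, A scores that word 1 (it reads the
-- stale next_letter left over from the previous word) and may move it ahead in
-- the output; B scores an isolated letter 0 since it has no adjacent letters,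
-- which is the intended adjacent-consonant rule.
def D_sort_by_consonant_count (lst : List String) : Prop := pvBadAt none lst = true
instance (lst : List String) : Decidable (D_sort_by_consonant_count lst) := by
  unfold D_sort_by_consonant_count; infer_instance

def Spec_sort_by_consonant_count (lst : List String) (out : List String) : Prop :=
  ¬ D_sort_by_consonant_count lst → out = sort_by_consonant_count_alt lst
instance (lst : List String) (out : List String) : Decidable (Spec_sort_by_consonant_count lst out) := by
  unfold Spec_sort_by_consonant_count; infer_instance

def pvDiffWitness_sort_by_consonant_count : List String := ["ab", "c"]
def pvDiffWitnessOut_sort_by_consonant_count : (List String) × (List String) :=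
  (["c", "ab"], ["ab", "c"])

-- ===== CLAIM (what is proved, stated in full; the proofs are below) =====
def Claim_unchanged_sort_by_consonant_count : Prop := ∀ (lst : List String), Dom_sort_by_consonant_count lst → Pre_sort_by_consonant_count lst → Spec_sort_by_consonant_count lst (sort_by_consonant_count lst)
def Claim_changed_sort_by_consonant_count : Prop := Dom_sort_by_consonant_count (pvDiffWitness_sort_by_consonant_count) ∧ Pre_sort_by_consonant_count (pvDiffWitness_sort_by_consonant_count) ∧ D_sort_by_consonant_count (pvDiffWitness_sort_by_consonant_count) ∧ sort_by_consonant_count (pvDiffWitness_sort_by_consonant_count) = pvDiffWitnessOut_sort_by_consonant_count.1 ∧ sort_by_consonant_count_alt (pvDiffWitness_sort_by_consonant_count) = pvDiffWitnessOut_sort_by_consonant_count.2 ∧ pvDiffWitnessOut_sort_by_consonant_count.1 ≠ pvDiffWitnessOut_sort_by_consonant_count.2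

-- ===== LEMMAS AND PROOFS =====

-- A's score of one word as a function of the carried stale next_letter
def pvWScore (carry : Option Char) (cs : List Char) : Int :=
  if cs.length = 1 then (if pvIsCons (cs.headD ' ') && pvOptCons carry then 1 else 0)
  else (PySem.List.enumerate cs).foldl (pvBScoreStep cs) 0

lemma pv_seg (cs : List Char) : ∀ (t : List Char) (c : Char) (s : Nat) (p0 : Int) (pr : Option Char),
    1 ≤ s → cs.drop s = c :: t →
    (PySem.List.enumerate (c :: t) (s : Int)).foldl (pvAStep cs) (p0, pr, some c)
    = ((PySem.List.enumerate (c :: t) (s : Int)).foldl (pvBScoreStep cs) p0,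
       cs[cs.length - 2]?, cs[cs.length - 1]?) := by
  intro t
  induction t with
  | nil =>
    intro c s p0 pr hs hdrop
    have hlt : s < cs.length := by
      by_contra h
      simp [List.drop_eq_nil_of_le (by omega : cs.length ≤ s)] at hdrop
    have hlen : cs.length = s + 1 := by
      have := congrArg List.length hdrop
      simp [List.length_drop] at this
      omega
    have hget : cs[s]? = some c := by
      have h0 : (List.drop s cs)[0]? = cs[s + 0]? := List.getElem?_drop
      rw [hdrop] at h0
      simpa using h0.symm
    have e1 : ((cs.length : Int) - 1) = (s : Int) := by omega
    have e2 : ¬ ((s : Int) = 0) := by omega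
    have e3 : (0 : Int) ≤ (s : Int) - 1 := by omega
    simp only [PySem.List.enumerate_cons, PySem.List.enumerate_nil, List.foldl_cons,
      List.foldl_nil, pvAStep, pvBScoreStep, e1]
    simp only [ne_eq, not_true_eq_false, if_false, ite_not, e2, if_true]
    have e4 : PySem.List.pyGet? cs ((s:Int) - 1) = cs[cs.length - 2]? := by
      rw [PySem.List.pyGet?_of_nonneg cs e3]
      congr 1
      omega
    have e5 : decide ((0:Int) < (s:Int)) = true := by simp; omega
    have e6 : decide ((s:Int) + 1 < (cs.length : Int)) = false := by simp; omega
    have e7 : cs[cs.length - 1]? = some c := by rw [show cs.length - 1 = s by omega]; exact hget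
    rw [e4, e5, e6, e7]
    cases hc : pvIsCons c <;> cases hp : pvOptCons cs[cs.length - 2]? <;> simp
  | cons c' t ih =>
    intro c s p0 pr hs hdrop
    have hlen' : cs.length - s = t.length + 2 ∧ s ≤ cs.length := by
      constructor
      · have := congrArg List.length hdrop
        simpa [List.length_drop] using this
      · by_contra h
        simp [List.drop_eq_nil_of_le (by omega : cs.length ≤ s)] at hdrop
    have hlen : cs.length = s + t.length + 2 := by omega
    have hget : cs[s]? = some c := by
      have h0 : (List.drop s cs)[0]? = cs[s + 0]? := List.getElem?_drop
      rw [hdrop] at h0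
      simpa using h0.symm
    have hget1 : cs[s + 1]? = some c' := by
      have h0 : (List.drop s cs)[1]? = cs[s + 1]? := List.getElem?_drop
      rw [hdrop] at h0
      simpa using h0.symm
    have hdrop1 : cs.drop (s + 1) = c' :: t := by
      have h0 : (List.drop s cs).tail = List.drop (s + 1) cs := List.tail_drop
      rw [hdrop] at h0
      simpa using h0.symm
    have e1 : ¬ ((s : Int) = (cs.length : Int) - 1) := by omega
    have e2 : ¬ ((s : Int) = 0) := by omega
    simp only [PySem.List.enumerate_cons, List.foldl_cons]
    have stepA : pvAStep cs (p0, pr, some c) ((s : Int), c)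
        = (pvBScoreStep cs p0 ((s : Int), c), PySem.List.pyGet? cs ((s:Int) - 1), some c') := by
      simp only [pvAStep, pvBScoreStep]
      simp only [ne_eq, e1, e2, not_false_eq_true, if_true]
      have g1 : PySem.List.pyGet? cs ((s:Int) + 1) = some c' := by
        rw [show ((s:Int) + 1) = ((s + 1 : Nat) : Int) by omega, PySem.List.pyGet?_natCast, hget1]
      have e5 : decide ((0:Int) < (s:Int)) = true := by simp; omega
      have e6 : decide ((s:Int) + 1 < (cs.length : Int)) = true := by simp; omega
      rw [g1, e5, e6]
      cases hc : pvIsCons c <;>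
        cases hp : pvOptCons (PySem.List.pyGet? cs ((s:Int) - 1)) <;>
        cases hn : pvOptCons (some c') <;> simp
    rw [stepA]
    have := ih c' (s + 1) (pvBScoreStep cs p0 ((s : Int), c)) (PySem.List.pyGet? cs ((s:Int) - 1))
      (by omega) hdrop1
    rw [show ((s:Int) + 1) = ((s + 1 : Nat) : Int) by omega]
    exact this

-- A's previous_letter after a word (never read across words; tracked for the induction)
def pvPrevOut (pr : Option Char) (cs : List Char) : Option Char :=
  if 1 < cs.length then cs[cs.length - 2]? else pr

-- B's per-index test, named so the count-if loop shape is visible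
def pvBCond (cs : List Char) (pc : Int × Char) : Bool :=
  pvIsCons pc.2 &&
    ((decide (0 < pc.1) && pvOptCons (PySem.List.pyGet? cs (pc.1 - 1))) ||
     (decide (pc.1 + 1 < (cs.length : Int)) && pvOptCons (PySem.List.pyGet? cs (pc.1 + 1))))

lemma pvBScoreStep_eq (cs : List Char) :
    pvBScoreStep cs = fun s pc => if pvBCond cs pc then s + 1 else s := rfl

lemma pv_inner (cs : List Char) (p0 : Int) (pr nx : Option Char) :
    (PySem.List.enumerate cs).foldl (pvAStep cs) (p0, pr, nx)
    = (p0 + pvWScore nx cs, pvPrevOut pr cs, pvNewCarry nx cs) := by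
  match cs with
  | [] =>
    simp [PySem.List.enumerate_nil, pvWScore, pvPrevOut, pvNewCarry]
  | [c] =>
    simp only [PySem.List.enumerate_cons, PySem.List.enumerate_nil, List.foldl_cons,
      List.foldl_nil, pvAStep, pvWScore, pvPrevOut, pvNewCarry]
    norm_num
    cases hc : pvIsCons c <;> cases hn : pvOptCons nx <;> simp
  | c0 :: c1 :: t =>
    have hdrop1 : (c0 :: c1 :: t).drop 1 = c1 :: t := rfl
    have hlen : (c0 :: c1 :: t).length = t.length + 2 := by simp
    rw [PySem.List.enumerate_cons, List.foldl_cons]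
    have stepA : pvAStep (c0 :: c1 :: t) (p0, pr, nx) ((0 : Int), c0)
        = (pvBScoreStep (c0 :: c1 :: t) p0 ((0 : Int), c0), pr, some c1) := by
      simp only [pvAStep, pvBScoreStep]
      have e1 : ¬ ((0 : Int) = ((c0 :: c1 :: t).length : Int) - 1) := by
        simp only [hlen]; omega
      have g1 : PySem.List.pyGet? (c0 :: c1 :: t) ((0:Int) + 1) = some c1 := by
        rw [show ((0:Int) + 1) = ((1 : Nat) : Int) by norm_num, PySem.List.pyGet?_natCast]
        rfl
      simp only [ne_eq, e1, not_false_eq_true, if_true, not_true_eq_false,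
        if_false, g1]
      have e6 : decide ((0:Int) + 1 < (((c0 :: c1 :: t).length : Int))) = true := by
        simp only [hlen]; simp; omega
      simp only [e6]
      cases hc : pvIsCons c0 <;> cases hn : pvIsCons c1 <;> simp [hn, pvOptCons]
    rw [stepA]
    have hseg := pv_seg (c0 :: c1 :: t) t c1 1
      (pvBScoreStep (c0 :: c1 :: t) p0 ((0 : Int), c0)) pr (le_refl 1) hdrop1
    rw [show ((1 : Nat) : Int) = (0 : Int) + 1 by norm_num] at hseg
    rw [hseg]
    have hsc : pvWScore nx (c0 :: c1 :: t)
        = (PySem.List.enumerate (c1 :: t) ((0:Int) + 1)).foldl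
            (pvBScoreStep (c0 :: c1 :: t)) (pvBScoreStep (c0 :: c1 :: t) 0 ((0:Int), c0)) := by
      simp only [pvWScore, hlen]
      norm_num
      simp
    have hshift : ∀ X : Int,
        (PySem.List.enumerate (c1 :: t) ((0:Int) + 1)).foldl
            (pvBScoreStep (c0 :: c1 :: t)) X
        = X + (PySem.List.enumerate (c1 :: t) ((0:Int) + 1)).foldl
            (pvBScoreStep (c0 :: c1 :: t)) 0 := by
      intro X
      rw [pvBScoreStep_eq, PySem.List.foldl_count_if, PySem.List.foldl_count_if]
      omega
    have hp0 : pvBScoreStep (c0 :: c1 :: t) p0 ((0:Int), c0)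
        = p0 + pvBScoreStep (c0 :: c1 :: t) 0 ((0:Int), c0) := by
      simp only [pvBScoreStep]; split <;> omega
    simp only [Prod.mk.injEq]
    refine ⟨?_, ?_, ?_⟩
    · rw [hsc, hp0]
      simp only [zero_add] at hshift ⊢
      rw [hshift (p0 + pvBScoreStep (c0 :: c1 :: t) 0 ((0:Int), c0)),
        hshift (pvBScoreStep (c0 :: c1 :: t) 0 ((0:Int), c0))]
      ring
    · simp [pvPrevOut, hlen]
    · simp [pvNewCarry, hlen]

-- the per-word (score, carry) recursion A implements across the list
def pvScores : Option Char → List String → List (String × Int)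
  | _, [] => []
  | c, w :: ws => (w, pvWScore c (pvStrip w)) :: pvScores (pvNewCarry c (pvStrip w)) ws

def pvCarryL : Option Char → List String → Option Char
  | c, [] => c
  | c, w :: ws => pvCarryL (pvNewCarry c (pvStrip w)) ws

lemma pv_outerA (ws : List String) : ∀ (pairs0 : List (String × Int)) (pr nx : Option Char),
    ∃ pr', ws.foldl pvAWord (pairs0, pr, nx) = (pairs0 ++ pvScores nx ws, pr', pvCarryL nx ws) := by
  induction ws with
  | nil => intro pairs0 pr nx; exact ⟨pr, by simp [pvScores, pvCarryL]⟩
  | cons w ws ih =>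
    intro pairs0 pr nx
    have hstep : pvAWord (pairs0, pr, nx) w
        = (pairs0 ++ [(w, pvWScore nx (pvStrip w))], pvPrevOut pr (pvStrip w),
           pvNewCarry nx (pvStrip w)) := by
      simp [pvAWord, pv_inner]
    obtain ⟨pr', hpr⟩ := ih (pairs0 ++ [(w, pvWScore nx (pvStrip w))])
      (pvPrevOut pr (pvStrip w)) (pvNewCarry nx (pvStrip w))
    refine ⟨pr', ?_⟩
    rw [List.foldl_cons, hstep, hpr]
    simp [pvScores, pvCarryL]

-- B's pair list is just a map
def pvF (w : String) : String × Int := (w, pvWScoreB (pvStrip w))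

lemma pv_outerB (ws : List String) : ∀ (d : PySem.Dict Int (List String)) (t : Int),
    ws.foldl pvBWord (d, t)
    = ((ws.map pvF).foldl (fun d p => d.modify p.2 [] (· ++ [p.1])) d,
       (ws.map pvF).foldl (fun t p => max t p.2) t) := by
  induction ws with
  | nil => intro d t; simp
  | cons w ws ih =>
    intro d t
    rw [List.foldl_cons,
      show pvBWord (d, t) w
        = (d.modify (pvWScoreB (pvStrip w)) [] (· ++ [w]), max t (pvWScoreB (pvStrip w))) from rfl,
      ih]
    simp [pvF]

lemma pv_buckets (ps : List (String × Int)) : ∀ (d : PySem.Dict Int (List String)) (v : Int),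
    (ps.foldl (fun d p => d.modify p.2 [] (· ++ [p.1])) d).getD v []
    = d.getD v [] ++ (ps.filter (fun p => p.2 == v)).map (·.1) := by
  induction ps with
  | nil => intro d v; simp
  | cons p ps ih =>
    intro d v
    rw [List.foldl_cons, ih]
    by_cases hv : v = p.2
    · subst hv
      rw [PySem.Dict.getD_modify_self]
      simp
    · rw [PySem.Dict.getD_modify_of_ne d [] _ hv]
      have : (p.2 == v) = false := by simp [Ne.symm hv]
      simp [this]

lemma pv_nonneg (cs : List Char) : 0 ≤ pvWScoreB cs := by
  unfold pvWScoreB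
  rw [pvBScoreStep_eq, PySem.List.foldl_count_if]
  positivity

lemma pv_while (pairs : List (String × Int)) : ∀ (fuel : Nat) (s : Int) (acc : List String),
    fuel = (s + 1).toNat →
    pvSortWhile pairs s fuel acc
    = acc ++ (PySem.List.pyRange s (-1) (-1)).flatMap
        (fun v => ((pairs.filter (fun p => p.2 == v)).map (·.1))) := by
  intro fuel
  induction fuel with
  | zero =>
    intro s acc hf
    rw [PySem.List.pyRange_neg_one_eq_nil (by omega : s ≤ -1)]
    simp [pvSortWhile]
  | succ fuel ih =>
    intro s acc hf
    have hs : 0 ≤ s := by omega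
    rw [pvSortWhile, PySem.List.foldl_append_if (fun p => p.2 == s) (·.1) pairs acc,
      ih (s - 1) _ (by omega),
      PySem.List.pyRange_neg_one_cons (by omega : (-1 : Int) < s)]
    simp [List.flatMap_cons]

lemma pv_sortA (x : String × Int) (ps : List (String × Int)) :
    pvSortTheWords (x :: ps)
    = (PySem.List.pyRange ((ps.map (·.2)).foldl max x.2) (-1) (-1)).flatMap
        (fun v => (((x :: ps).filter (fun p => p.2 == v)).map (·.1))) := by
  unfold pvSortTheWords
  rw [PySem.List.foldl_append_singleton_eq_map]
  simp only [List.nil_append, List.map_cons]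
  rw [PySem.List.max?_id_cons]
  simp only []
  rw [pv_while _ _ _ _ rfl]
  simp

lemma pv_sortB (x : String × Int) (ps : List (String × Int)) (h0 : 0 ≤ x.2) :
    (PySem.List.pyRange ((x :: ps).foldl (fun t p => max t p.2) 0) (-1) (-1)).foldl
        (fun acc s => acc ++
          ((x :: ps).foldl (fun d p => d.modify p.2 [] (· ++ [p.1]))
            (PySem.Dict.empty : PySem.Dict Int (List String))).getD s []) []
    = (PySem.List.pyRange ((ps.map (·.2)).foldl max x.2) (-1) (-1)).flatMap
        (fun v => (((x :: ps).filter (fun p => p.2 == v)).map (·.1))) := by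
  have hTop : (x :: ps).foldl (fun t p => max t p.2) 0 = (ps.map (·.2)).foldl max x.2 := by
    rw [List.foldl_cons, max_eq_right h0, List.foldl_map]
  rw [hTop, PySem.List.foldl_append_eq_flatMap]
  simp only [List.nil_append]
  congr 1
  funext v
  rw [pv_buckets, PySem.Dict.getD_empty]
  simp

-- a single isolated letter scores 0 under B's uniform rule
lemma pvWScoreB_single (d : Char) : pvWScoreB [d] = 0 := by
  simp only [pvWScoreB, PySem.List.enumerate_cons, PySem.List.enumerate_nil,
    List.foldl_cons, List.foldl_nil, pvBScoreStep]
  norm_num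

-- outside the stale-letter condition A's per-word score agrees with B's
lemma pvWScore_eq (c : Option Char) (cs : List Char)
    (h : (match cs with | [d] => pvIsCons d && pvOptCons c | _ => false) = false) :
    pvWScore c cs = pvWScoreB cs := by
  match cs with
  | [] => simp [pvWScore, pvWScoreB, PySem.List.enumerate_nil]
  | [d] =>
    simp only at h
    simp [pvWScore, pvWScoreB_single, h]
  | a :: b :: t =>
    simp [pvWScore, pvWScoreB]

lemma pv_scores_eq (ws : List String) : ∀ (c : Option Char), pvBadAt c ws = false →
    pvScores c ws = ws.map pvF := by
  induction ws with
  | nil => intro c _; simp [pvScores]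
  | cons w ws ih =>
    intro c h
    rw [pvBadAt] at h
    simp only [Bool.or_eq_false_iff] at h
    rw [pvScores, ih _ h.2, List.map_cons]
    rw [pvWScore_eq c (pvStrip w) h.1]
    rfl

theorem pv_ports_eq (lst : List String) (hnd : pvBadAt none lst = false) :
    sort_by_consonant_count lst = sort_by_consonant_count_alt lst := by
  cases lst with
  | nil => rfl
  | cons w ws =>
    obtain ⟨pr', hA⟩ := pv_outerA (w :: ws) [] none none
    unfold sort_by_consonant_count sort_by_consonant_count_alt
    rw [hA, pv_outerB]
    simp only [List.nil_append]
    rw [pv_scores_eq (w :: ws) none hnd, List.map_cons]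
    rw [pv_sortA (pvF w) (ws.map pvF), pv_sortB (pvF w) (ws.map pvF) (pv_nonneg _)]

-- ===== VERDICT (by name: the statements are the Claim_ definitions above) =====
theorem sort_by_consonant_count_spec : Claim_unchanged_sort_by_consonant_count := by
  intro lst _ _ hnd
  exact pv_ports_eq lst (by
    cases h : pvBadAt none lst
    · rfl
    · exact absurd h hnd)

theorem sort_by_consonant_count_changed : Claim_changed_sort_by_consonant_count := by
  unfold Claim_changed_sort_by_consonant_count; decide
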